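-- pv_equiv track=rewrite | github.com/alnvdl/fstringen | fstringen/generator.py | _putify
-- ===== SOURCE A (Python) =====
-- import textwrap
--
-- def _putify(template):
--     if "\n" in template:
--         template = textwrap.dedent(template)
--
--     lines = template.split("\n")
--     newlines = []
--     for line in lines:
--         # We don't care about indent in single-line strings
--         if len(lines) == 1:
--             indent = ''
--         else:
--             indent = line[:len(line) - len(line.lstrip())]
--         # Take out all the isolated '{' and '}' characters
--         line = line.replace("{{", "#_fstringen_ocbblock#").replace(
--             "}}", "#_fstringen_ccbblock#")
--         nl = line.replace("{", "{_put(").replace("}", ", '" + indent + "')}")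
--         # Put back all the isolated '{' and '}' characters
--         nl = nl.replace("#_fstringen_ocbblock#",
--                         "{{").replace("#_fstringen_ccbblock#", "}}")
--         newlines.append(nl)
--     return "\n".join(newlines)
-- ===== SOURCE B (Python) =====
-- import textwrap
--
-- def _scan(line, indent):
--     # single left-to-right pass: greedy two-char lookahead on brace runs
--     close = ", '" + indent + "')}"
--     out = []
--     i, n = 0, len(line)
--     while i < n:
--         c = line[i]
--         if c == "{":
--             if i + 1 < n and line[i + 1] == "{":
--                 out.append("{{")
--                 i += 2
--             else:
--                 out.append("{_put(")
--                 i += 1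
--         elif c == "}":
--             if i + 1 < n and line[i + 1] == "}":
--                 out.append("}}")
--                 i += 2
--             else:
--                 out.append(close)
--                 i += 1
--         else:
--             out.append(c)
--             i += 1
--     return "".join(out)
--
-- def _indent(line):
--     i = 0
--     while i < len(line) and line[i].isspace():
--         i += 1
--     return line[:i]
--
-- def _putify(template):
--     if "\n" not in template:
--         return _scan(template, "")
--     lines = textwrap.dedent(template).split("\n")
--     return "\n".join(_scan(line, _indent(line)) for line in lines)
-- ===== Notes on version B (the rewrite author's own statement) =====
-- stated objective: alternative
-- what changed: Per line, the three-pass sentinel-swap-and-restore (six str.replace passes through hash-marker sentinel strings) is replaced by a single left-to-right scan with two-character lookahead that copies doubled braces verbatim and expands each lone brace in place.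
-- intended difference: On inputs that already contain A's internal hash-delimited sentinel marker text (the ocbblock/ccbblock marker adjacent to a hash or to a doubled brace), A's restore pass rewrites that user text into braces; B transforms only the braces and leaves the marker text intact, which is what a maintainer intends. — e.g. on _putify("#_fstringen_ocbblock#"): A returns "{{", B returns "#_fstringen_ocbblock#"
import Mathlib
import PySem

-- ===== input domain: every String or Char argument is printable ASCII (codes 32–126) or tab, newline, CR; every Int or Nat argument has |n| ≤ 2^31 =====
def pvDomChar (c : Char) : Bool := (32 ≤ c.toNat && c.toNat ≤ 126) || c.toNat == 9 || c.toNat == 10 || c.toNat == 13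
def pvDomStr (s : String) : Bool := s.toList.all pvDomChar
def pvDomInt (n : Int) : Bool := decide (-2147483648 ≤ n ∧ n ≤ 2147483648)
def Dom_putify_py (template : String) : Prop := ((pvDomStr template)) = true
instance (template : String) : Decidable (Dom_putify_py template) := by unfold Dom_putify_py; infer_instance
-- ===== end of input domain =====

-- B replaces the three-pass sentinel-swap-and-restore per line by a single left-to-right
-- two-char-lookahead scan (objective: alternative; same cost, no sentinel round-trip).

-- ===== PORT A =====

-- shared model of the library call textwrap.dedent (both Pythons call it; CPython 3.11 semantics
-- on the ASCII domain: whitespace-only lines blanked, longest common [ \t]-prefix of the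
-- remaining lines removed)
def pvTabSp (c : Char) : Bool := c = ' ' || c = '\t'

def pvCommonPrefix (a b : List Char) : List Char :=
  ((a.zip b).takeWhile (fun p => p.1 == p.2)).map Prod.fst

def pvBlank (l : List Char) : List Char :=
  if l.all pvTabSp && !l.isEmpty then [] else l

def pvMargin (lines : List (List Char)) : List Char :=
  match (lines.filter (fun l => !(l.all pvTabSp))).map (fun l => l.takeWhile pvTabSp) with
  | [] => []
  | i0 :: rest => rest.foldl pvCommonPrefix i0

def pvDrop (m l : List Char) : List Char :=
  if m.isPrefixOf l then l.drop m.length else l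

def pyDedent (t : String) : String :=
  let lines := (PySem.Chars.splitOn t.toList ['\n']).map pvBlank
  String.ofList (PySem.Chars.join ['\n'] (lines.map (pvDrop (pvMargin lines))))

-- the sentinel strings of A
def ocbS : List Char := "#_fstringen_ocbblock#".toList
def ccbS : List Char := "#_fstringen_ccbblock#".toList

-- port of A: dedent when multi-line, then per line the six str.replace passes
def putify_py (template : String) : String :=
  let template := if PySem.Str.isIn "\n" template then pyDedent template else template
  let lines := PySem.Chars.splitOn template.toList ['\n']
  let newlines := lines.foldl (fun acc line =>
    let indent : List Char :=
      if lines.length = 1 then []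
      else PySem.Chars.slice line none
        (some ((line.length : Int) - ((PySem.Chars.lstrip line).length : Int)))
    let line2 := PySem.Chars.replace (PySem.Chars.replace line "{{".toList ocbS) "}}".toList ccbS
    let nl := PySem.Chars.replace (PySem.Chars.replace line2 "{".toList "{_put(".toList)
        "}".toList (", '".toList ++ indent ++ "')}".toList)
    let nl := PySem.Chars.replace (PySem.Chars.replace nl ocbS "{{".toList) ccbS "}}".toList
    acc ++ [nl]) []
  String.ofList (PySem.Chars.join ['\n'] newlines)

-- ===== PORT B =====

-- single left-to-right scan with two-char lookahead (port of Source B's while loop)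
def scanC (indent : List Char) : List Char → List Char
  | '{' :: '{' :: t => '{' :: '{' :: scanC indent t
  | '{' :: t => "{_put(".toList ++ scanC indent t
  | '}' :: '}' :: t => '}' :: '}' :: scanC indent t
  | '}' :: t => (", '".toList ++ indent ++ "')}".toList) ++ scanC indent t
  | c :: t => c :: scanC indent t
  | [] => []

def putify_py_alt (template : String) : String :=
  if !(PySem.Str.isIn "\n" template) then String.ofList (scanC [] template.toList)
  else
    let lines := PySem.Chars.splitOn (pyDedent template).toList ['\n']
    String.ofList (PySem.Chars.join ['\n']
      (lines.map (fun line => scanC (line.takeWhile PySem.Chars.isspace) line)))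

-- ===== PRECONDITION & SPEC =====

-- A leaks its internal sentinel round-trip exactly when the input contains its sentinel
-- context patterns; on those inputs A rewrites/garbles the text, B leaves it intact.
def pvPats : List (List Char) :=
  ["#_fstringen_ocbblock#".toList, "#_fstringen_ocbblock{{".toList, "#_fstringen_ocbblock}}".toList,
   "}}_fstringen_ocbblock#".toList, "}}_fstringen_ocbblock{{".toList, "}}_fstringen_ocbblock}}".toList,
   "#_fstringen_ccbblock#".toList, "#_fstringen_ccbblock}}".toList]

-- On inputs containing A's internal sentinel "#_fstringen_ocbblock#"/"#_fstringen_ccbblock#"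
-- (or that sentinel assembled next to a brace pair), A's restore pass rewrites user text into
-- braces; B returns the text transformed without any sentinel damage, which is what a
-- maintainer intends for template text that happens to mention the marker.
def D_putify_py (template : String) : Prop :=
  (pvPats.any (fun p => PySem.Chars.isIn p template.toList)) = true
instance (template : String) : Decidable (D_putify_py template) := by
  unfold D_putify_py; infer_instance

def Spec_putify_py (template : String) (out : String) : Prop :=
  ¬ D_putify_py template → out = putify_py_alt template
instance (template : String) (out : String) : Decidable (Spec_putify_py template out) := by
  unfold Spec_putify_py; infer_instance

def pvDiffWitness_putify_py : String := "#_fstringen_ocbblock#"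
def pvDiffWitnessOut_putify_py : String × String := ("{{", "#_fstringen_ocbblock#")

-- ===== CLAIM (what is proved, stated in full; the proofs are below) =====
def Claim_unchanged_putify_py : Prop :=
  ∀ (template : String), Dom_putify_py template → Spec_putify_py template (putify_py template)
def Claim_changed_putify_py : Prop :=
  Dom_putify_py (pvDiffWitness_putify_py) ∧ D_putify_py (pvDiffWitness_putify_py) ∧
  putify_py (pvDiffWitness_putify_py) = pvDiffWitnessOut_putify_py.1 ∧
  putify_py_alt (pvDiffWitness_putify_py) = pvDiffWitnessOut_putify_py.2 ∧
  pvDiffWitnessOut_putify_py.1 ≠ pvDiffWitnessOut_putify_py.2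

-- ===== LEMMAS AND PROOFS =====

def rep (old new : List Char) : List Char → List Char
  | [] => []
  | c :: t =>
    if old.isPrefixOf (c :: t) then new ++ rep old new (t.drop (old.length - 1))
    else c :: rep old new t
termination_by l => l.length
decreasing_by
  · simp only [List.length_drop, List.length_cons]; omega
  · simp


lemma rep_go (old new : List Char) (h : old ≠ []) :
    ∀ (fuel : Nat) (l acc : List Char), l.length ≤ fuel →
      PySem.Chars.replace.go old new fuel l acc = acc.reverse ++ rep old new l := by
  intro fuel
  induction fuel with
  | zero =>
    intro l acc h0
    obtain rfl : l = [] := by simpa using List.length_eq_zero_iff.mp (Nat.le_zero.mp h0)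
    simp [PySem.Chars.replace.go, rep]
  | succ n ih =>
    intro l acc hl
    match l with
    | [] => simp [PySem.Chars.replace.go, rep]
    | c :: t =>
      rw [PySem.Chars.replace.go, rep]
      obtain ⟨o, os, rfl⟩ : ∃ o os, old = o :: os := by
        cases old with | nil => exact absurd rfl h | cons o os => exact ⟨o, os, rfl⟩
      by_cases hp : (o :: os).isPrefixOf (c :: t)
      · simp only [hp, if_true]
        have hd : List.drop (o :: os).length (c :: t) = t.drop ((o :: os).length - 1) := by
          simp [List.drop_succ_cons]
        have hlen : (t.drop ((o :: os).length - 1)).length ≤ n := by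
          simp only [List.length_drop]
          simp only [List.length_cons] at hl
          omega
        rw [hd, ih _ _ hlen]
        simp
      · simp only [hp]
        have hlen : t.length ≤ n := by
          simp only [List.length_cons] at hl; omega
        rw [ih _ _ hlen]
        simp

lemma replace_eq_rep (s old new : List Char) (h : old ≠ []) :
    PySem.Chars.replace s old new = rep old new s := by
  rw [PySem.Chars.replace]
  simp only [List.isEmpty_iff]
  rw [if_neg h, rep_go old new h s.length s [] le_rfl]
  simp

def split1 : List Char → List (List Char)
  | [] => [[]]
  | c :: t =>
    match split1 t with
    | [] => [[c]]
    | h :: r => if c = '\n' then [] :: h :: r else (c :: h) :: r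

lemma split1_ne_nil (l : List Char) : split1 l ≠ [] := by
  induction l with
  | nil => simp [split1]
  | cons c t ih =>
    rw [split1]
    rcases h : split1 t with _ | ⟨h2, r⟩
    · simp
    · by_cases hc : c = '\n' <;> simp [hc]

lemma split1_shape : ∀ (l h : List Char) (r : List (List Char)), split1 l = h :: r →
    (h <+: l ∧ ∀ p ∈ r, p <:+: l) ∧ (∀ p ∈ h :: r, '\n' ∉ p) := by
  intro l
  induction l with
  | nil =>
    intro h r he
    simp only [split1, List.cons.injEq] at he
    obtain ⟨rfl, rfl⟩ := he
    refine ⟨⟨List.nil_prefix, by simp⟩, by simp⟩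
  | cons c t ih =>
    intro h r he
    rw [split1] at he
    rcases h2 : split1 t with _ | ⟨ht, rt⟩
    · exact absurd h2 (split1_ne_nil t)
    · rw [h2] at he
      obtain ⟨⟨hpre, hinf⟩, hnl⟩ := ih ht rt h2
      by_cases hc : c = '\n'
      · simp only [hc, if_true, List.cons.injEq] at he
        obtain ⟨rfl, rfl⟩ := he
        refine ⟨⟨List.nil_prefix, ?_⟩, ?_⟩
        · intro p hp
          rcases List.mem_cons.mp hp with rfl | hp
          · exact hpre.isInfix.trans (List.infix_cons (List.infix_refl t))
          · exact (hinf p hp).trans (List.infix_cons (List.infix_refl t))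
        · intro p hp
          rcases List.mem_cons.mp hp with rfl | hp
          · simp
          · exact hnl p hp
      · simp only [hc, if_false] at he
        obtain ⟨rfl, rfl⟩ := he
        refine ⟨⟨by exact (List.prefix_cons_inj c).mpr hpre, ?_⟩, ?_⟩
        · intro p hp
          exact (hinf p hp).trans (List.infix_cons (List.infix_refl t))
        · intro p hp
          rcases List.mem_cons.mp hp with rfl | hp
          · intro hm
            rcases List.mem_cons.mp hm with hm | hm
            · exact hc hm.symm
            · exact hnl ht (List.mem_cons_self ..) hm
          · exact hnl p (List.mem_cons_of_mem _ hp)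

lemma split1_infix (l p : List Char) (hp : p ∈ split1 l) : p <:+: l := by
  rcases h : split1 l with _ | ⟨h1, r⟩
  · exact absurd h (split1_ne_nil l)
  · obtain ⟨⟨hpre, hinf⟩, _⟩ := split1_shape l h1 r h
    rw [h] at hp
    rcases List.mem_cons.mp hp with rfl | hp
    · exact hpre.isInfix
    · exact hinf p hp

lemma split1_no_nl (l p : List Char) (hp : p ∈ split1 l) : '\n' ∉ p := by
  rcases h : split1 l with _ | ⟨h1, r⟩
  · exact absurd h (split1_ne_nil l)
  · exact (split1_shape l h1 r h).2 p (h ▸ hp)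

lemma split1_single (l : List Char) (h : '\n' ∉ l) : split1 l = [l] := by
  induction l with
  | nil => simp [split1]
  | cons c t ih =>
    rw [split1, ih (fun hm => h (List.mem_cons_of_mem _ hm))]
    have hc : c ≠ '\n' := fun hc => h (hc ▸ List.mem_cons_self ..)
    simp [hc]

lemma split1_intercalate : ∀ (parts : List (List Char)), parts ≠ [] →
    (∀ p ∈ parts, '\n' ∉ p) → split1 (List.intercalate ['\n'] parts) = parts := by
  intro parts
  induction parts with
  | nil => intro h; exact absurd rfl h
  | cons p rest ih =>
    intro _ hnl
    rcases rest with _ | ⟨q, rest'⟩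
    · simpa [List.intercalate] using split1_single p (hnl p (List.mem_cons_self ..))
    · have hi : List.intercalate ['\n'] (p :: q :: rest') =
          p ++ '\n' :: List.intercalate ['\n'] (q :: rest') := by
        simp [List.intercalate, List.intersperse]
      rw [hi]
      have ihq := ih (by simp) (fun r hr => hnl r (List.mem_cons_of_mem _ hr))
      have : ∀ (u : List Char), '\n' ∉ u →
          split1 (u ++ '\n' :: List.intercalate ['\n'] (q :: rest')) =
            u :: split1 (List.intercalate ['\n'] (q :: rest')) := by
        intro u hu
        induction u with
        | nil =>
          rw [List.nil_append, split1]
          rcases h : split1 (List.intercalate ['\n'] (q :: rest')) with _ | ⟨h1, r⟩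
          · exact absurd h (split1_ne_nil _)
          · simp
        | cons a u' ihu =>
          rw [List.cons_append, split1, ihu (fun hm => hu (List.mem_cons_of_mem _ hm))]
          have ha : a ≠ '\n' := fun hc => hu (hc ▸ List.mem_cons_self ..)
          simp [ha]
      rw [this p (hnl p (List.mem_cons_self ..)), ihq]

def prepHead (p : List Char) : List (List Char) → List (List Char)
  | [] => [p]
  | h :: r => (p ++ h) :: r

lemma splitOn_go_spec :
    ∀ (fuel : Nat) (l cur : List Char) (acc : List (List Char)), l.length < fuel →
      PySem.Chars.splitOn.go ['\n'] fuel l cur acc =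
        acc.reverse ++ prepHead cur.reverse (split1 l) := by
  intro fuel
  induction fuel with
  | zero => intro l cur acc h0; omega
  | succ n ih =>
    intro l cur acc hl
    match l with
    | [] => simp [PySem.Chars.splitOn.go, split1, prepHead]
    | c :: t =>
      rw [PySem.Chars.splitOn.go]
      by_cases hc : c = '\n'
      · subst hc
        have hp : (['\n'] : List Char).isPrefixOf ('\n' :: t) = true := by
          simp [List.isPrefixOf]
        simp only [hp, if_true, List.length_cons, List.drop_succ_cons, List.drop_zero, List.length_nil]
        rw [ih t [] (cur.reverse :: acc) (by simp at hl; omega)]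
        rw [split1]
        rcases h : split1 t with _ | ⟨h2, r⟩
        · exact absurd h (split1_ne_nil t)
        · simp [prepHead]
      · have hp : (['\n'] : List Char).isPrefixOf (c :: t) = false := by
          simp [List.isPrefixOf]
          exact fun h => hc h.symm
        simp only [hp, Bool.false_eq_true, if_false]
        rw [ih t (c :: cur) acc (by simp at hl; omega)]
        rw [split1]
        rcases h : split1 t with _ | ⟨h2, r⟩
        · exact absurd h (split1_ne_nil t)
        · simp [hc, prepHead]

lemma splitOn_nl (l : List Char) : PySem.Chars.splitOn l ['\n'] = split1 l := by
  rw [PySem.Chars.splitOn, splitOn_go_spec (l.length + 1) l [] [] (by omega)]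
  rcases h : split1 l with _ | ⟨h2, r⟩
  · exact absurd h (split1_ne_nil l)
  · simp [prepHead]

-- proof-side abbreviations
def PUT : List Char := "{_put(".toList
def CL (ind : List Char) : List Char := ", '".toList ++ ind ++ "')}".toList
def core1 : List Char := "_fstringen_ocbblock".toList
def core2 : List Char := "_fstringen_ccbblock".toList


lemma ocbS_chars : ocbS = ['#','_','f','s','t','r','i','n','g','e','n','_','o','c','b','b','l','o','c','k','#'] := by decide
lemma ccbS_chars : ccbS = ['#','_','f','s','t','r','i','n','g','e','n','_','c','c','b','b','l','o','c','k','#'] := by decide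
lemma PUT_chars : PUT = ['{','_','p','u','t','('] := by decide
lemma core1_chars : core1 = ['_','f','s','t','r','i','n','g','e','n','_','o','c','b','b','l','o','c','k'] := by decide
lemma core2_chars : core2 = ['_','f','s','t','r','i','n','g','e','n','_','c','c','b','b','l','o','c','k'] := by decide
lemma ocbS_cons : ocbS = '#' :: (core1 ++ ['#']) := by rw [ocbS_chars, core1_chars]; rfl
lemma ccbS_cons : ccbS = '#' :: (core2 ++ ['#']) := by rw [ccbS_chars, core2_chars]; rfl
lemma ocb_no_rb : ∀ c ∈ ocbS, c ≠ '}' := by rw [ocbS_chars]; intro c hc; fin_cases hc <;> decide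
lemma ocb_no_lb : ∀ c ∈ ocbS, c ≠ '{' := by rw [ocbS_chars]; intro c hc; fin_cases hc <;> decide
lemma ccb_no_rb : ∀ c ∈ ccbS, c ≠ '}' := by rw [ccbS_chars]; intro c hc; fin_cases hc <;> decide
lemma ccb_no_lb : ∀ c ∈ ccbS, c ≠ '{' := by rw [ccbS_chars]; intro c hc; fin_cases hc <;> decide
lemma put_no_rb : ∀ c ∈ PUT, c ≠ '}' := by rw [PUT_chars]; intro c hc; fin_cases hc <;> decide
lemma put_no_hash : ∀ c ∈ PUT, c ≠ '#' := by rw [PUT_chars]; intro c hc; fin_cases hc <;> decide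
lemma core2_no_hash : ∀ c ∈ core2, c ≠ '#' := by rw [core2_chars]; intro c hc; fin_cases hc <;> decide

def G (ind : List Char) : List Char → List Char
  | '{' :: '{' :: t => ocbS ++ G ind t
  | '{' :: t => PUT ++ G ind t
  | '}' :: '}' :: t => ccbS ++ G ind t
  | '}' :: t => CL ind ++ G ind t
  | c :: t => c :: G ind t
  | [] => []

def g5 (ind : List Char) : List Char → List Char
  | '{' :: '{' :: t => '{' :: '{' :: g5 ind t
  | '{' :: t => PUT ++ g5 ind t
  | '}' :: '}' :: t => ccbS ++ g5 ind t
  | '}' :: t => CL ind ++ g5 ind t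
  | c :: t => c :: g5 ind t
  | [] => []

def NP (l : List Char) : Prop := ∀ p ∈ pvPats, ¬ p <:+: l
def indOK (ind : List Char) : Prop := ∀ c ∈ ind, PySem.Chars.isspace c = true

-- rep step lemmas
lemma rep_nil (old new : List Char) : rep old new [] = [] := by rw [rep]

lemma rep_fire (o : Char) (os new X : List Char) :
    rep (o :: os) new ((o :: os) ++ X) = new ++ rep (o :: os) new X := by
  rw [List.cons_append, rep]
  rw [if_pos (by rw [List.isPrefixOf_iff_prefix]; exact ⟨X, by simp⟩)]
  simp [List.drop_left']

lemma rep_cons_not_prefix {o c : Char} {os t : List Char} (new : List Char)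
    (h : (o :: os).isPrefixOf (c :: t) = false) :
    rep (o :: os) new (c :: t) = c :: rep (o :: os) new t := by
  rw [rep, if_neg (by simp [h])]

lemma rep_cons_ne {o c : Char} (os new t : List Char) (h : c ≠ o) :
    rep (o :: os) new (c :: t) = c :: rep (o :: os) new t := by
  apply rep_cons_not_prefix
  simp [List.isPrefixOf]
  exact fun he => absurd he.symm h

lemma rep_walk_ne {o : Char} (os new : List Char) (pfx X : List Char)
    (h : ∀ c ∈ pfx, c ≠ o) :
    rep (o :: os) new (pfx ++ X) = pfx ++ rep (o :: os) new X := by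
  induction pfx with
  | nil => simp
  | cons a p ih =>
    rw [List.cons_append, rep_cons_ne _ _ _ (h a (List.mem_cons_self ..)),
      ih (fun c hc => h c (List.mem_cons_of_mem _ hc))]
    simp

lemma suffix_tail {a : Char} {s m : List Char} (h : (a :: s) <:+ m) : s <:+ m := by
  obtain ⟨u, hu⟩ := h
  exact ⟨u ++ [a], by simpa using hu⟩

lemma mem_of_suffix_cons {a : Char} {s m : List Char} (h : (a :: s) <:+ m) : a ∈ m :=
  h.subset (List.mem_cons_self ..)

-- the head-dispatch helper, used by both lemD lemmas
lemma hchar_disp (core : List Char) {s : List Char} (hs : s <:+ core) (b : Char) (rest : List Char)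
    (hpre : (s ++ ['#']) <+: (b :: rest)) :
    (s = [] ∧ b = '#') ∨
    (∃ a s', s = a :: s' ∧ a = b ∧ a ∈ core ∧ s' <:+ core ∧ (s' ++ ['#']) <+: rest) := by
  rcases s with _ | ⟨a, s'⟩
  · left
    exact ⟨rfl, (by simpa using hpre : '#' = b).symm⟩
  · right
    rw [List.cons_append, List.cons_prefix_cons] at hpre
    exact ⟨a, s', rfl, hpre.1, mem_of_suffix_cons hs, suffix_tail hs, hpre.2⟩

lemma lemD_G : ∀ (n : Nat) (t s ind : List Char), t.length ≤ n → s <:+ core1 →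
    (s ++ ['#']) <+: G ind t →
    ((s ++ ['#']) <+: t) ∨ ((s ++ ['{', '{']) <+: t) ∨ ((s ++ ['}', '}']) <+: t) := by
  intro n
  induction n with
  | zero =>
    intro t s ind ht hs hp
    obtain rfl : t = [] := by simpa using List.length_eq_zero_iff.mp (Nat.le_zero.mp ht)
    rw [show G ind [] = [] from by simp [G]] at hp
    exact absurd (List.prefix_nil.mp hp) (by simp)
  | succ n ih =>
    intro t s ind ht hs hp
    rcases t with _ | ⟨c, t1⟩
    · rw [show G ind [] = [] from by simp [G]] at hp
      exact absurd (List.prefix_nil.mp hp) (by simp)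
    by_cases hc : c = '{'
    · subst hc
      rcases t1 with _ | ⟨d, t2⟩
      · -- G ind ['{'] = PUT
        rw [show G ind ['{'] = PUT from by simp [G]] at hp
        rcases hchar_disp core1 hs '{' _ (by simpa [PUT] using hp) with ⟨rfl, hb⟩ | ⟨a, s', rfl, ha, hmem, _, _⟩
        · exact absurd hb (by decide)
        · exact absurd (ha ▸ hmem) (by decide)
      by_cases hd : d = '{'
      · subst hd
        rw [show G ind ('{'::'{'::t2) = ocbS ++ G ind t2 from by simp [G]] at hp
        rcases hchar_disp core1 hs '#' _ (by simpa [ocbS] using hp) with ⟨rfl, _⟩ | ⟨a, s', rfl, ha, hmem, _, _⟩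
        · right; left; exact ⟨t2, by simp⟩
        · exact absurd (ha ▸ hmem) (by decide)
      · rw [show G ind ('{'::d::t2) = PUT ++ G ind (d::t2) from by simp [G, hd]] at hp
        rcases hchar_disp core1 hs '{' _ (by simpa [PUT] using hp) with ⟨rfl, hb⟩ | ⟨a, s', rfl, ha, hmem, _, _⟩
        · exact absurd hb (by decide)
        · exact absurd (ha ▸ hmem) (by decide)
    by_cases hc2 : c = '}'
    · subst hc2
      rcases t1 with _ | ⟨d, t2⟩
      · rw [show G ind ['}'] = CL ind from by simp [G]] at hp
        rcases hchar_disp core1 hs ',' _ (by simpa [CL] using hp) with ⟨rfl, hb⟩ | ⟨a, s', rfl, ha, hmem, _, _⟩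
        · exact absurd hb (by decide)
        · exact absurd (ha ▸ hmem) (by decide)
      by_cases hd : d = '}'
      · subst hd
        rw [show G ind ('}'::'}'::t2) = ccbS ++ G ind t2 from by simp [G]] at hp
        rcases hchar_disp core1 hs '#' _ (by simpa [ccbS] using hp) with ⟨rfl, _⟩ | ⟨a, s', rfl, ha, hmem, _, _⟩
        · right; right; exact ⟨t2, by simp⟩
        · exact absurd (ha ▸ hmem) (by decide)
      · rw [show G ind ('}'::d::t2) = CL ind ++ G ind (d::t2) from by simp [G, hd]] at hp
        rcases hchar_disp core1 hs ',' _ (by simpa [CL] using hp) with ⟨rfl, hb⟩ | ⟨a, s', rfl, ha, hmem, _, _⟩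
        · exact absurd hb (by decide)
        · exact absurd (ha ▸ hmem) (by decide)
    · rw [show G ind (c::t1) = c :: G ind t1 from by simp [G, hc, hc2]] at hp
      rcases hchar_disp core1 hs c _ hp with ⟨rfl, rfl⟩ | ⟨a, s', rfl, ha, _, hs', hp'⟩
      · left; exact ⟨t1, by simp⟩
      · subst ha
        rcases ih t1 s' ind (by simp at ht; omega) hs' hp' with h | h | h
        · left; rw [List.cons_append]; exact List.cons_prefix_cons.mpr ⟨rfl, h⟩
        · right; left; rw [List.cons_append]; exact List.cons_prefix_cons.mpr ⟨rfl, h⟩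
        · right; right; rw [List.cons_append]; exact List.cons_prefix_cons.mpr ⟨rfl, h⟩

lemma lemD_g5 : ∀ (n : Nat) (t s ind : List Char), t.length ≤ n → s <:+ core2 →
    (s ++ ['#']) <+: g5 ind t →
    ((s ++ ['#']) <+: t) ∨ ((s ++ ['}', '}']) <+: t) := by
  intro n
  induction n with
  | zero =>
    intro t s ind ht hs hp
    obtain rfl : t = [] := by simpa using List.length_eq_zero_iff.mp (Nat.le_zero.mp ht)
    rw [show g5 ind [] = [] from by simp [g5]] at hp
    exact absurd (List.prefix_nil.mp hp) (by simp)
  | succ n ih =>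
    intro t s ind ht hs hp
    rcases t with _ | ⟨c, t1⟩
    · rw [show g5 ind [] = [] from by simp [g5]] at hp
      exact absurd (List.prefix_nil.mp hp) (by simp)
    by_cases hc : c = '{'
    · subst hc
      rcases t1 with _ | ⟨d, t2⟩
      · rw [show g5 ind ['{'] = PUT from by simp [g5]] at hp
        rcases hchar_disp core2 hs '{' _ (by simpa [PUT] using hp) with ⟨rfl, hb⟩ | ⟨a, s', rfl, ha, hmem, _, _⟩
        · exact absurd hb (by decide)
        · exact absurd (ha ▸ hmem) (by decide)
      by_cases hd : d = '{'
      · subst hd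
        rw [show g5 ind ('{'::'{'::t2) = '{'::'{':: g5 ind t2 from by simp [g5]] at hp
        rcases hchar_disp core2 hs '{' _ hp with ⟨rfl, hb⟩ | ⟨a, s', rfl, ha, hmem, _, _⟩
        · exact absurd hb (by decide)
        · exact absurd (ha ▸ hmem) (by decide)
      · rw [show g5 ind ('{'::d::t2) = PUT ++ g5 ind (d::t2) from by simp [g5, hd]] at hp
        rcases hchar_disp core2 hs '{' _ (by simpa [PUT] using hp) with ⟨rfl, hb⟩ | ⟨a, s', rfl, ha, hmem, _, _⟩
        · exact absurd hb (by decide)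
        · exact absurd (ha ▸ hmem) (by decide)
    by_cases hc2 : c = '}'
    · subst hc2
      rcases t1 with _ | ⟨d, t2⟩
      · rw [show g5 ind ['}'] = CL ind from by simp [g5]] at hp
        rcases hchar_disp core2 hs ',' _ (by simpa [CL] using hp) with ⟨rfl, hb⟩ | ⟨a, s', rfl, ha, hmem, _, _⟩
        · exact absurd hb (by decide)
        · exact absurd (ha ▸ hmem) (by decide)
      by_cases hd : d = '}'
      · subst hd
        rw [show g5 ind ('}'::'}'::t2) = ccbS ++ g5 ind t2 from by simp [g5]] at hp
        rcases hchar_disp core2 hs '#' _ (by simpa [ccbS] using hp) with ⟨rfl, _⟩ | ⟨a, s', rfl, ha, hmem, _, _⟩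
        · right; exact ⟨t2, by simp⟩
        · exact absurd (ha ▸ hmem) (by decide)
      · rw [show g5 ind ('}'::d::t2) = CL ind ++ g5 ind (d::t2) from by simp [g5, hd]] at hp
        rcases hchar_disp core2 hs ',' _ (by simpa [CL] using hp) with ⟨rfl, hb⟩ | ⟨a, s', rfl, ha, hmem, _, _⟩
        · exact absurd hb (by decide)
        · exact absurd (ha ▸ hmem) (by decide)
    · rw [show g5 ind (c::t1) = c :: g5 ind t1 from by simp [g5, hc, hc2]] at hp
      rcases hchar_disp core2 hs c _ hp with ⟨rfl, rfl⟩ | ⟨a, s', rfl, ha, _, hs', hp'⟩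
      · left; exact ⟨t1, by simp⟩
      · subst ha
        rcases ih t1 s' ind (by simp at ht; omega) hs' hp' with h | h
        · left; rw [List.cons_append]; exact List.cons_prefix_cons.mpr ⟨rfl, h⟩
        · right; rw [List.cons_append]; exact List.cons_prefix_cons.mpr ⟨rfl, h⟩

def chain4 (ind : List Char) (l : List Char) : List Char :=
  rep ['}'] (CL ind) (rep ['{'] PUT (rep ['}','}'] ccbS (rep ['{','{'] ocbS l)))

lemma not_prefix_two {a : Char} (W : List Char) (hW : ∀ e tl, W = e :: tl → e ≠ a) :
    ([a, a] : List Char).isPrefixOf (a :: W) = false := by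
  rcases W with _ | ⟨e, tl⟩
  · simp [List.isPrefixOf]
  · have he := hW e tl rfl
    simp [List.isPrefixOf]
    exact fun h => absurd h.symm he

lemma rep1_head_cases (t1 : List Char) :
    (t1 = [] ∧ rep ['{','{'] ocbS t1 = []) ∨
    (∃ d t', t1 = d :: t' ∧ ((∃ tl, rep ['{','{'] ocbS t1 = '#' :: tl) ∨ (∃ tl, rep ['{','{'] ocbS t1 = d :: tl))) := by
  rcases t1 with _ | ⟨d, t'⟩
  · exact Or.inl ⟨rfl, rep_nil _ _⟩
  · right
    refine ⟨d, t', rfl, ?_⟩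
    by_cases hd : d = '{'
    · subst hd
      rcases t' with _ | ⟨e, t''⟩
      · right
        rw [rep_cons_not_prefix _ (by decide)]
        exact ⟨_, rfl⟩
      by_cases he : e = '{'
      · subst he
        left
        rw [show ('{'::'{'::t'' : List Char) = ['{','{'] ++ t'' from rfl, rep_fire]
        rw [ocbS_cons]
        exact ⟨_, rfl⟩
      · right
        rw [rep_cons_not_prefix _ (not_prefix_two _ (fun e' tl h => by injection h with h1 _; exact h1 ▸ he))]
        exact ⟨_, rfl⟩
    · right
      rw [rep_cons_ne _ _ _ hd]
      exact ⟨_, rfl⟩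

lemma rep_fire' (o : Char) (new X : List Char) :
    rep [o] new (o :: X) = new ++ rep [o] new X := by
  simpa using rep_fire o [] new X

set_option maxRecDepth 8192 in
lemma C4 : ∀ (n : Nat) (l ind : List Char), l.length ≤ n → chain4 ind l = G ind l := by
  intro n
  induction n with
  | zero =>
    intro l ind hl
    obtain rfl : l = [] := by simpa using List.length_eq_zero_iff.mp (Nat.le_zero.mp hl)
    simp [chain4, rep_nil, G]
  | succ n ih =>
    intro l ind hl
    rcases l with _ | ⟨c, t1⟩
    · simp [chain4, rep_nil, G]
    by_cases hc : c = '{'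
    · subst hc
      rcases t1 with _ | ⟨d, t2⟩
      · have e1 : rep ['{','{'] ocbS ['{'] = ['{'] := by
          rw [rep_cons_not_prefix _ (by decide), rep_nil]
        have e2 : rep ['}','}'] ccbS ['{'] = ['{'] := by
          rw [rep_cons_ne _ _ _ (by decide), rep_nil]
        have e3 : rep ['{'] PUT ['{'] = PUT := by
          rw [rep_fire', rep_nil, List.append_nil]
        have e4 : rep ['}'] (CL ind) PUT = PUT := by
          have := rep_walk_ne ([] : List Char) (CL ind) PUT [] put_no_rb
          simpa [rep_nil] using this
        rw [chain4, e1, e2, e3, e4]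
        simp [G, PUT]
      by_cases hd : d = '{'
      · subst hd
        have e1 : rep ['{','{'] ocbS ('{'::'{'::t2) = ocbS ++ rep ['{','{'] ocbS t2 :=
          rep_fire '{' ['{'] ocbS t2
        have e2 : ∀ X, rep ['}','}'] ccbS (ocbS ++ X) = ocbS ++ rep ['}','}'] ccbS X :=
          fun X => rep_walk_ne _ _ _ _ ocb_no_rb
        have e3 : ∀ X, rep ['{'] PUT (ocbS ++ X) = ocbS ++ rep ['{'] PUT X :=
          fun X => rep_walk_ne _ _ _ _ ocb_no_lb
        have e4 : ∀ X, rep ['}'] (CL ind) (ocbS ++ X) = ocbS ++ rep ['}'] (CL ind) X :=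
          fun X => rep_walk_ne _ _ _ _ ocb_no_rb
        rw [chain4, e1, e2, e3, e4]
        rw [show rep ['}'] (CL ind) (rep ['{'] PUT (rep ['}','}'] ccbS (rep ['{','{'] ocbS t2))) = chain4 ind t2 from rfl,
          ih t2 ind (by simp only [List.length_cons] at hl; omega)]
        simp [G]
      · have e1 : rep ['{','{'] ocbS ('{'::d::t2) = '{' :: rep ['{','{'] ocbS (d::t2) :=
          rep_cons_not_prefix _ (not_prefix_two _ (fun e tl h => by injection h with h1 _; exact h1 ▸ hd))
        have e2 : ∀ X, rep ['}','}'] ccbS ('{' :: X) = '{' :: rep ['}','}'] ccbS X :=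
          fun X => rep_cons_ne _ _ _ (by decide)
        have e3 : ∀ X, rep ['{'] PUT ('{' :: X) = PUT ++ rep ['{'] PUT X :=
          fun X => rep_fire' _ _ _
        have e4 : ∀ X, rep ['}'] (CL ind) (PUT ++ X) = PUT ++ rep ['}'] (CL ind) X :=
          fun X => rep_walk_ne _ _ _ _ put_no_rb
        rw [chain4, e1, e2, e3, e4]
        rw [show rep ['}'] (CL ind) (rep ['{'] PUT (rep ['}','}'] ccbS (rep ['{','{'] ocbS (d::t2)))) = chain4 ind (d::t2) from rfl,
          ih (d::t2) ind (by simp only [List.length_cons] at hl ⊢; omega)]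
        simp [G, hd, PUT]
    by_cases hc2 : c = '}'
    · subst hc2
      rcases t1 with _ | ⟨d, t2⟩
      · have e1 : rep ['{','{'] ocbS ['}'] = ['}'] := by
          rw [rep_cons_ne _ _ _ (by decide), rep_nil]
        have e2 : rep ['}','}'] ccbS ['}'] = ['}'] := by
          rw [rep_cons_not_prefix _ (by decide), rep_nil]
        have e3 : rep ['{'] PUT ['}'] = ['}'] := by
          rw [rep_cons_ne _ _ _ (by decide), rep_nil]
        have e4 : rep ['}'] (CL ind) ['}'] = CL ind := by
          rw [rep_fire', rep_nil, List.append_nil]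
        rw [chain4, e1, e2, e3, e4]
        simp [G]
      by_cases hd : d = '}'
      · subst hd
        have e1 : rep ['{','{'] ocbS ('}'::'}'::t2) = '}' :: '}' :: rep ['{','{'] ocbS t2 := by
          rw [rep_cons_ne _ _ _ (by decide), rep_cons_ne _ _ _ (by decide)]
        have e2 : ∀ X, rep ['}','}'] ccbS ('}'::'}'::X) = ccbS ++ rep ['}','}'] ccbS X :=
          fun X => rep_fire '}' ['}'] ccbS X
        have e3 : ∀ X, rep ['{'] PUT (ccbS ++ X) = ccbS ++ rep ['{'] PUT X :=
          fun X => rep_walk_ne _ _ _ _ ccb_no_lb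
        have e4 : ∀ X, rep ['}'] (CL ind) (ccbS ++ X) = ccbS ++ rep ['}'] (CL ind) X :=
          fun X => rep_walk_ne _ _ _ _ ccb_no_rb
        rw [chain4, e1, e2, e3, e4]
        rw [show rep ['}'] (CL ind) (rep ['{'] PUT (rep ['}','}'] ccbS (rep ['{','{'] ocbS t2))) = chain4 ind t2 from rfl,
          ih t2 ind (by simp only [List.length_cons] at hl; omega)]
        simp [G]
      · have e1 : rep ['{','{'] ocbS ('}'::d::t2) = '}' :: rep ['{','{'] ocbS (d::t2) :=
          rep_cons_ne _ _ _ (by decide)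
        have e2 : rep ['}','}'] ccbS ('}' :: rep ['{','{'] ocbS (d::t2)) =
            '}' :: rep ['}','}'] ccbS (rep ['{','{'] ocbS (d::t2)) := by
          apply rep_cons_not_prefix
          apply not_prefix_two
          rcases rep1_head_cases (d :: t2) with ⟨h1, _⟩ | ⟨d', t', he, hcase⟩
          · exact absurd h1 (by simp)
          · injection he with he1 he2
            subst he1; subst he2
            rcases hcase with ⟨tl, htl⟩ | ⟨tl, htl⟩
            · intro e tl' h'
              rw [htl] at h'; injection h' with h1 _; exact h1 ▸ (by decide)
            · intro e tl' h'
              rw [htl] at h'; injection h' with h1 _; exact h1 ▸ hd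
        have e3 : ∀ X, rep ['{'] PUT ('}' :: X) = '}' :: rep ['{'] PUT X :=
          fun X => rep_cons_ne _ _ _ (by decide)
        have e4 : ∀ X, rep ['}'] (CL ind) ('}' :: X) = CL ind ++ rep ['}'] (CL ind) X :=
          fun X => rep_fire' _ _ _
        rw [chain4, e1, e2, e3, e4]
        rw [show rep ['}'] (CL ind) (rep ['{'] PUT (rep ['}','}'] ccbS (rep ['{','{'] ocbS (d::t2)))) = chain4 ind (d::t2) from rfl,
          ih (d::t2) ind (by simp only [List.length_cons] at hl ⊢; omega)]
        simp [G, hd]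
    · have e1 : rep ['{','{'] ocbS (c::t1) = c :: rep ['{','{'] ocbS t1 :=
        rep_cons_ne _ _ _ hc
      have e2 : ∀ X, rep ['}','}'] ccbS (c :: X) = c :: rep ['}','}'] ccbS X :=
        fun X => rep_cons_ne _ _ _ hc2
      have e3 : ∀ X, rep ['{'] PUT (c :: X) = c :: rep ['{'] PUT X :=
        fun X => rep_cons_ne _ _ _ hc
      have e4 : ∀ X, rep ['}'] (CL ind) (c :: X) = c :: rep ['}'] (CL ind) X :=
        fun X => rep_cons_ne _ _ _ hc2
      rw [chain4, e1, e2, e3, e4]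
      rw [show rep ['}'] (CL ind) (rep ['{'] PUT (rep ['}','}'] ccbS (rep ['{','{'] ocbS t1))) = chain4 ind t1 from rfl,
        ih t1 ind (by simp only [List.length_cons] at hl; omega)]
      simp [G, hc, hc2]

-- specialized step lemmas for the restore passes
lemma rep5_walk (new pfx X : List Char) (h : ∀ c ∈ pfx, c ≠ '#') :
    rep ocbS new (pfx ++ X) = pfx ++ rep ocbS new X := by
  rw [ocbS_cons]; exact rep_walk_ne _ _ _ _ h

lemma rep6_walk (new pfx X : List Char) (h : ∀ c ∈ pfx, c ≠ '#') :
    rep ccbS new (pfx ++ X) = pfx ++ rep ccbS new X := by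
  rw [ccbS_cons]; exact rep_walk_ne _ _ _ _ h

lemma rep5_cons_ne (new X : List Char) {c : Char} (h : c ≠ '#') :
    rep ocbS new (c :: X) = c :: rep ocbS new X := by
  rw [ocbS_cons]; exact rep_cons_ne _ _ _ h

lemma rep6_cons_ne (new X : List Char) {c : Char} (h : c ≠ '#') :
    rep ccbS new (c :: X) = c :: rep ccbS new X := by
  rw [ccbS_cons]; exact rep_cons_ne _ _ _ h

lemma rep5_fire (new X : List Char) :
    rep ocbS new (ocbS ++ X) = new ++ rep ocbS new X := by
  rw [ocbS_cons]; exact rep_fire _ _ _ _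

lemma rep6_fire (new X : List Char) :
    rep ccbS new (ccbS ++ X) = new ++ rep ccbS new X := by
  rw [ccbS_cons]; exact rep_fire _ _ _ _

lemma rep5_hash_step (new X : List Char) (h : ¬ ((core1 ++ ['#']) <+: X)) :
    rep ocbS new ('#' :: X) = '#' :: rep ocbS new X := by
  rw [ocbS_cons]
  apply rep_cons_not_prefix
  simp only [List.isPrefixOf, beq_self_eq_true, Bool.true_and]
  rw [← Bool.not_eq_true, List.isPrefixOf_iff_prefix]
  exact h

lemma rep6_hash_step (new X : List Char) (h : ¬ ((core2 ++ ['#']) <+: X)) :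
    rep ccbS new ('#' :: X) = '#' :: rep ccbS new X := by
  rw [ccbS_cons]
  apply rep_cons_not_prefix
  simp only [List.isPrefixOf, beq_self_eq_true, Bool.true_and]
  rw [← Bool.not_eq_true, List.isPrefixOf_iff_prefix]
  exact h

lemma ocb_not_prefix_ccb (X : List Char) : ocbS.isPrefixOf (ccbS ++ X) = false := by
  rw [ocbS_chars, ccbS_chars]
  simp [List.isPrefixOf]

lemma cl_no_hash (ind : List Char) (h : indOK ind) : ∀ c ∈ CL ind, c ≠ '#' := by
  intro c hc
  rw [CL] at hc
  rcases List.mem_append.mp hc with hc1 | hc2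
  · rcases List.mem_append.mp hc1 with hc3 | hc4
    · revert hc3
      rw [show (", '".toList : List Char) = [',', ' ', '\''] from by decide]
      intro hc3; fin_cases hc3 <;> decide
    · intro heq
      have := h c hc4
      rw [heq] at this
      exact absurd this (by decide)
  · revert hc2
    rw [show ("')}".toList : List Char) = ['\'', ')', '}'] from by decide]
    intro hc2; fin_cases hc2 <;> decide

lemma NP_tail {c : Char} {t : List Char} (h : (∀ p ∈ pvPats, ¬ p <:+: (c :: t))) :
    ∀ p ∈ pvPats, ¬ p <:+: t := by
  intro p hp hinf
  exact h p hp (hinf.trans (List.infix_cons (List.infix_refl t)))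

-- pattern decompositions
lemma pat1_eq : ("#_fstringen_ocbblock#".toList : List Char) = '#' :: (core1 ++ ['#']) := by
  rw [core1_chars]; decide
lemma pat2_eq : ("#_fstringen_ocbblock{{".toList : List Char) = '#' :: (core1 ++ ['{','{']) := by
  rw [core1_chars]; decide
lemma pat3_eq : ("#_fstringen_ocbblock}}".toList : List Char) = '#' :: (core1 ++ ['}','}']) := by
  rw [core1_chars]; decide
lemma pat4_eq : ("}}_fstringen_ocbblock#".toList : List Char) = '}' :: '}' :: (core1 ++ ['#']) := by
  rw [core1_chars]; decide
lemma pat5_eq : ("}}_fstringen_ocbblock{{".toList : List Char) = '}' :: '}' :: (core1 ++ ['{','{']) := by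
  rw [core1_chars]; decide
lemma pat6_eq : ("}}_fstringen_ocbblock}}".toList : List Char) = '}' :: '}' :: (core1 ++ ['}','}']) := by
  rw [core1_chars]; decide
lemma pat7_eq : ("#_fstringen_ccbblock#".toList : List Char) = '#' :: (core2 ++ ['#']) := by
  rw [core2_chars]; decide
lemma pat8_eq : ("#_fstringen_ccbblock}}".toList : List Char) = '#' :: (core2 ++ ['}','}']) := by
  rw [core2_chars]; decide

lemma rep5_not_prefix {c : Char} (new X : List Char) (h : ocbS.isPrefixOf (c :: X) = false) :
    rep ocbS new (c :: X) = c :: rep ocbS new X := by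
  rw [ocbS_cons]
  exact rep_cons_not_prefix _ (by rw [← ocbS_cons]; exact h)

lemma ocb_ccb_walk (new X : List Char) (hno : ¬ ((core1 ++ ['#']) <+: X)) :
    rep ocbS new (ccbS ++ X) = ccbS ++ rep ocbS new X := by
  have h0 : ccbS ++ X = '#' :: (core2 ++ ('#' :: X)) := by rw [ccbS_cons]; simp
  rw [h0, rep5_not_prefix _ _ (by rw [← h0]; exact ocb_not_prefix_ccb X),
    rep5_walk _ _ _ core2_no_hash, rep5_hash_step _ _ hno, ccbS_cons]
  simp

lemma C5 : ∀ (n : Nat) (l ind : List Char), l.length ≤ n → NP l → indOK ind →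
    rep ocbS ['{','{'] (G ind l) = g5 ind l := by
  intro n
  induction n with
  | zero =>
    intro l ind hl _ _
    obtain rfl : l = [] := by simpa using List.length_eq_zero_iff.mp (Nat.le_zero.mp hl)
    simp [G, rep_nil, g5]
  | succ n ih =>
    intro l ind hl hnp hind
    rcases l with _ | ⟨c, t1⟩
    · simp [G, rep_nil, g5]
    by_cases hc : c = '{'
    · subst hc
      rcases t1 with _ | ⟨d, t2⟩
      · rw [show G ind ['{'] = PUT from by simp [G],
          show PUT = PUT ++ [] from by simp, rep5_walk _ _ _ put_no_hash, rep_nil]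
        simp [g5, PUT]
      by_cases hd : d = '{'
      · subst hd
        rw [show G ind ('{'::'{'::t2) = ocbS ++ G ind t2 from by simp [G], rep5_fire,
          ih t2 ind (by simp only [List.length_cons] at hl; omega) (NP_tail (NP_tail hnp)) hind]
        simp [g5]
      · rw [show G ind ('{'::d::t2) = PUT ++ G ind (d::t2) from by simp [G, hd],
          rep5_walk _ _ _ put_no_hash,
          ih (d::t2) ind (by simp only [List.length_cons] at hl ⊢; omega) (NP_tail hnp) hind]
        simp [g5, hd, PUT]
    by_cases hc2 : c = '}'
    · subst hc2
      rcases t1 with _ | ⟨d, t2⟩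
      · rw [show G ind ['}'] = CL ind from by simp [G],
          show CL ind = CL ind ++ [] from by simp, rep5_walk _ _ _ (cl_no_hash ind hind), rep_nil]
        simp [g5, CL]
      by_cases hd : d = '}'
      · subst hd
        have hno : ¬ ((core1 ++ ['#']) <+: G ind t2) := by
          intro hpre
          rcases lemD_G t2.length t2 core1 ind le_rfl (List.suffix_refl _) hpre with h | h | h
          · exact hnp ("}}_fstringen_ocbblock#".toList) (by simp [pvPats]) (by
              rw [pat4_eq]
              exact (List.cons_prefix_cons.mpr ⟨rfl, List.cons_prefix_cons.mpr ⟨rfl, h⟩⟩).isInfix)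
          · exact hnp ("}}_fstringen_ocbblock{{".toList) (by simp [pvPats]) (by
              rw [pat5_eq]
              exact (List.cons_prefix_cons.mpr ⟨rfl, List.cons_prefix_cons.mpr ⟨rfl, h⟩⟩).isInfix)
          · exact hnp ("}}_fstringen_ocbblock}}".toList) (by simp [pvPats]) (by
              rw [pat6_eq]
              exact (List.cons_prefix_cons.mpr ⟨rfl, List.cons_prefix_cons.mpr ⟨rfl, h⟩⟩).isInfix)
        rw [show G ind ('}'::'}'::t2) = ccbS ++ G ind t2 from by simp [G],
          ocb_ccb_walk _ _ hno,
          ih t2 ind (by simp only [List.length_cons] at hl; omega) (NP_tail (NP_tail hnp)) hind]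
        simp [g5]
      · rw [show G ind ('}'::d::t2) = CL ind ++ G ind (d::t2) from by simp [G, hd],
          rep5_walk _ _ _ (cl_no_hash ind hind),
          ih (d::t2) ind (by simp only [List.length_cons] at hl ⊢; omega) (NP_tail hnp) hind]
        simp [g5, hd, CL]
    · by_cases hh : c = '#'
      · subst hh
        have hno : ¬ ((core1 ++ ['#']) <+: G ind t1) := by
          intro hpre
          rcases lemD_G t1.length t1 core1 ind le_rfl (List.suffix_refl _) hpre with h | h | h
          · exact hnp ("#_fstringen_ocbblock#".toList) (by simp [pvPats]) (by
              rw [pat1_eq]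
              exact (List.cons_prefix_cons.mpr ⟨rfl, h⟩).isInfix)
          · exact hnp ("#_fstringen_ocbblock{{".toList) (by simp [pvPats]) (by
              rw [pat2_eq]
              exact (List.cons_prefix_cons.mpr ⟨rfl, h⟩).isInfix)
          · exact hnp ("#_fstringen_ocbblock}}".toList) (by simp [pvPats]) (by
              rw [pat3_eq]
              exact (List.cons_prefix_cons.mpr ⟨rfl, h⟩).isInfix)
        rw [show G ind ('#'::t1) = '#' :: G ind t1 from by simp [G],
          rep5_hash_step _ _ hno,
          ih t1 ind (by simp only [List.length_cons] at hl; omega) (NP_tail hnp) hind]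
        simp [g5]
      · rw [show G ind (c::t1) = c :: G ind t1 from by simp [G, hc, hc2],
          rep5_cons_ne _ _ hh,
          ih t1 ind (by simp only [List.length_cons] at hl; omega) (NP_tail hnp) hind]
        simp [g5, hc, hc2]

lemma C6 : ∀ (n : Nat) (l ind : List Char), l.length ≤ n → NP l → indOK ind →
    rep ccbS ['}','}'] (g5 ind l) = scanC ind l := by
  intro n
  induction n with
  | zero =>
    intro l ind hl _ _
    obtain rfl : l = [] := by simpa using List.length_eq_zero_iff.mp (Nat.le_zero.mp hl)
    simp [g5, rep_nil, scanC]
  | succ n ih =>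
    intro l ind hl hnp hind
    rcases l with _ | ⟨c, t1⟩
    · simp [g5, rep_nil, scanC]
    by_cases hc : c = '{'
    · subst hc
      rcases t1 with _ | ⟨d, t2⟩
      · rw [show g5 ind ['{'] = PUT from by simp [g5],
          show PUT = PUT ++ [] from by simp, rep6_walk _ _ _ put_no_hash, rep_nil]
        simp [scanC, PUT]
      by_cases hd : d = '{'
      · subst hd
        rw [show g5 ind ('{'::'{'::t2) = '{'::'{':: g5 ind t2 from by simp [g5],
          rep6_cons_ne _ _ (by decide), rep6_cons_ne _ _ (by decide),
          ih t2 ind (by simp only [List.length_cons] at hl; omega) (NP_tail (NP_tail hnp)) hind]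
        simp [scanC]
      · rw [show g5 ind ('{'::d::t2) = PUT ++ g5 ind (d::t2) from by simp [g5, hd],
          rep6_walk _ _ _ put_no_hash,
          ih (d::t2) ind (by simp only [List.length_cons] at hl ⊢; omega) (NP_tail hnp) hind]
        simp [scanC, hd, PUT]
    by_cases hc2 : c = '}'
    · subst hc2
      rcases t1 with _ | ⟨d, t2⟩
      · rw [show g5 ind ['}'] = CL ind from by simp [g5],
          show CL ind = CL ind ++ [] from by simp, rep6_walk _ _ _ (cl_no_hash ind hind), rep_nil]
        simp [scanC, CL]
      by_cases hd : d = '}'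
      · subst hd
        rw [show g5 ind ('}'::'}'::t2) = ccbS ++ g5 ind t2 from by simp [g5], rep6_fire,
          ih t2 ind (by simp only [List.length_cons] at hl; omega) (NP_tail (NP_tail hnp)) hind]
        simp [scanC]
      · rw [show g5 ind ('}'::d::t2) = CL ind ++ g5 ind (d::t2) from by simp [g5, hd],
          rep6_walk _ _ _ (cl_no_hash ind hind),
          ih (d::t2) ind (by simp only [List.length_cons] at hl ⊢; omega) (NP_tail hnp) hind]
        simp [scanC, hd, CL]
    · by_cases hh : c = '#'
      · subst hh
        have hno : ¬ ((core2 ++ ['#']) <+: g5 ind t1) := by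
          intro hpre
          rcases lemD_g5 t1.length t1 core2 ind le_rfl (List.suffix_refl _) hpre with h | h
          · exact hnp ("#_fstringen_ccbblock#".toList) (by simp [pvPats]) (by
              rw [pat7_eq]
              exact (List.cons_prefix_cons.mpr ⟨rfl, h⟩).isInfix)
          · exact hnp ("#_fstringen_ccbblock}}".toList) (by simp [pvPats]) (by
              rw [pat8_eq]
              exact (List.cons_prefix_cons.mpr ⟨rfl, h⟩).isInfix)
        rw [show g5 ind ('#'::t1) = '#' :: g5 ind t1 from by simp [g5],
          rep6_hash_step _ _ hno,
          ih t1 ind (by simp only [List.length_cons] at hl; omega) (NP_tail hnp) hind]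
        simp [scanC]
      · rw [show g5 ind (c::t1) = c :: g5 ind t1 from by simp [g5, hc, hc2],
          rep6_cons_ne _ _ hh,
          ih t1 ind (by simp only [List.length_cons] at hl; omega) (NP_tail hnp) hind]
        simp [scanC, hc, hc2]

-- the per-line equality: six replace passes on a pattern-free line = the single scan
lemma line_eq (l ind : List Char) (hnp : NP l) (hind : indOK ind) :
    rep ccbS ['}','}'] (rep ocbS ['{','{'] (chain4 ind l)) = scanC ind l := by
  rw [C4 l.length l ind le_rfl, C5 l.length l ind le_rfl hnp hind,
    C6 l.length l ind le_rfl hnp hind]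


-- ===== framing lemmas =====

lemma singleton_infix_iff (c : Char) (l : List Char) : [c] <:+: l ↔ c ∈ l := by
  constructor
  · rintro ⟨s, u, rfl⟩; simp
  · intro h
    obtain ⟨s, u, rfl⟩ := List.append_of_mem h
    exact ⟨s, u, by simp⟩

lemma split1_len2 (l : List Char) (h : '\n' ∈ l) : 2 ≤ (split1 l).length := by
  induction l with
  | nil => simp at h
  | cons c t ih =>
    rw [split1]
    rcases hs : split1 t with _ | ⟨h1, r⟩
    · exact absurd hs (split1_ne_nil t)
    by_cases hc : c = '\n'
    · simp [hc]
    · have hm : '\n' ∈ t := by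
        rcases List.mem_cons.mp h with h' | h'
        · exact absurd h'.symm hc
        · exact h'
      have := ih hm
      rw [hs] at this
      simp only [hc, if_false]
      simpa using this

-- decomposition of pyDedent's output into newline-free infix lines
lemma dedent_parts (t : String) :
    ∃ parts : List (List Char),
      (pyDedent t).toList = List.intercalate ['\n'] parts ∧
      parts.length = (split1 t.toList).length ∧
      (∀ p ∈ parts, '\n' ∉ p ∧ p <:+: t.toList) := by
  refine ⟨((PySem.Chars.splitOn t.toList ['\n']).map pvBlank).map
      (pvDrop (pvMargin ((PySem.Chars.splitOn t.toList ['\n']).map pvBlank))), ?_, ?_, ?_⟩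
  · rw [pyDedent]
    simp [PySem.Chars.join]
  · simp [splitOn_nl]
  · intro p hp
    rw [splitOn_nl, List.map_map, List.mem_map] at hp
    obtain ⟨l0, hl0, rfl⟩ := hp
    have hnl0 := split1_no_nl t.toList l0 hl0
    have hinf0 := split1_infix t.toList l0 hl0
    have key : ∀ (x : List Char), '\n' ∉ x → x <:+: t.toList →
        ('\n' ∉ pvDrop (pvMargin ((split1 t.toList).map pvBlank)) x ∧
         pvDrop (pvMargin ((split1 t.toList).map pvBlank)) x <:+: t.toList) := by
      intro x hx hxi
      rw [pvDrop]; split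
      · exact ⟨fun hmem => hx (List.mem_of_mem_drop hmem), ((List.drop_suffix _ _).isInfix).trans hxi⟩
      · exact ⟨hx, hxi⟩
    have hb : ('\n' ∉ pvBlank l0 ∧ pvBlank l0 <:+: t.toList) := by
      rw [pvBlank]; split
      · exact ⟨by simp, List.nil_infix⟩
      · exact ⟨hnl0, hinf0⟩
    simp only [Function.comp]
    exact key _ hb.1 hb.2

lemma indent_eq (l : List Char) :
    PySem.Chars.slice l none (some ((l.length : Int) - ((PySem.Chars.lstrip l).length : Int))) =
      l.takeWhile PySem.Chars.isspace := by
  have hsum : (l.takeWhile PySem.Chars.isspace).length + (l.dropWhile PySem.Chars.isspace).length = l.length := by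
    rw [← List.length_append, List.takeWhile_append_dropWhile]
  have hcast : (l.length : Int) - ((PySem.Chars.lstrip l).length : Int) =
      ((l.takeWhile PySem.Chars.isspace).length : Int) := by
    rw [show PySem.Chars.lstrip l = l.dropWhile PySem.Chars.isspace from rfl]
    omega
  have h2 : (l.takeWhile PySem.Chars.isspace ++ l.dropWhile PySem.Chars.isspace).take
      (l.takeWhile PySem.Chars.isspace).length = l.takeWhile PySem.Chars.isspace := List.take_left ..
  rw [List.takeWhile_append_dropWhile] at h2
  rw [hcast]
  rw [show PySem.Chars.slice l none (some (((l.takeWhile PySem.Chars.isspace).length : Nat) : Int)) =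
      l.take (l.takeWhile PySem.Chars.isspace).length from by
    simp [PySem.List.slice_to_natCast]]
  exact h2

lemma NP_of_infix {l m : List Char} (h : NP m) (hinf : l <:+: m) : NP l :=
  fun p hp hpl => h p hp (hpl.trans hinf)

lemma indOK_takeWhile (l : List Char) : indOK (l.takeWhile PySem.Chars.isspace) :=
  fun _ hc => List.mem_takeWhile_imp hc

-- per-line: A's six replace passes equal B's scan
set_option maxHeartbeats 2000000 in
lemma lineA_eq (line ind : List Char) (hnp : NP line) (hind : indOK ind) :
    PySem.Chars.replace (PySem.Chars.replace (PySem.Chars.replace (PySem.Chars.replace (PySem.Chars.replace (PySem.Chars.replace line "{{".toList ocbS) "}}".toList ccbS) "{".toList "{_put(".toList) "}".toList (", '".toList ++ ind ++ "')}".toList)) ocbS "{{".toList) ccbS "}}".toList = scanC ind line := by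
  rw [replace_eq_rep _ _ _ (by rw [ccbS_chars]; simp), replace_eq_rep _ _ _ (by rw [ocbS_chars]; simp),
    replace_eq_rep _ _ _ (by decide), replace_eq_rep _ _ _ (by decide),
    replace_eq_rep _ _ _ (by decide), replace_eq_rep _ _ _ (by decide)]

  rw [show ("{{".toList : List Char) = ['{','{'] from by decide,
    show ("}}".toList : List Char) = ['}','}'] from by decide,
    show ("{".toList : List Char) = ['{'] from by decide,
    show ("}".toList : List Char) = ['}'] from by decide,
    show ("{_put(".toList : List Char) = PUT from by rw [PUT_chars]; decide,
    show (", '".toList ++ ind ++ "')}".toList : List Char) = CL ind from rfl]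
  exact line_eq line ind hnp hind

set_option maxHeartbeats 2000000 in
lemma main_eq (template : String) (hD : ¬ D_putify_py template) :
    putify_py template = putify_py_alt template := by
  have NPt : NP template.toList := by
    intro p hp hinf
    apply hD
    rw [D_putify_py, List.any_eq_true]
    refine ⟨p, hp, ?_⟩
    rw [PySem.Chars.isIn_iff_infix]
    exact hinf
  by_cases hin : PySem.Str.isIn "\n" template = true
  · -- multi-line case
    obtain ⟨parts, hjoin, hplen, hprops⟩ := dedent_parts template
    have hnn : parts ≠ [] := by
      intro h0
      have := hplen
      rw [h0] at this
      exact split1_ne_nil template.toList (List.length_eq_zero_iff.mp this.symm)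
    have hsplit2 : PySem.Chars.splitOn (pyDedent template).toList ['\n'] = parts := by
      rw [hjoin, splitOn_nl, split1_intercalate parts hnn (fun p hp => (hprops p hp).1)]
    have hmem : '\n' ∈ template.toList := by
      rw [show PySem.Str.isIn "\n" template = PySem.Chars.isIn "\n".toList template.toList from by
        simp [PySem.Str.isIn], show ("\n".toList : List Char) = ['\n'] from by decide,
        PySem.Chars.isIn_iff_infix, singleton_infix_iff] at hin
      exact hin
    have hlen2 : parts.length ≠ 1 := by
      rw [hplen]
      have := split1_len2 template.toList hmem
      omega
    rw [putify_py, putify_py_alt]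
    rw [if_pos hin, hin]
    simp only [Bool.not_true, Bool.false_eq_true, if_false]
    rw [hsplit2]
    rw [PySem.List.foldl_append_singleton_eq_map]
    rw [List.nil_append]
    congr 1
    apply congrArg
    apply List.map_congr_left
    intro line hline
    rw [if_neg hlen2, indent_eq]
    exact lineA_eq line _ (NP_of_infix NPt (hprops line hline).2) (indOK_takeWhile line)
  · -- single-line case
    have hin' : PySem.Str.isIn "\n" template = false := eq_false_of_ne_true hin
    have hnomem : '\n' ∉ template.toList := by
      rw [show PySem.Str.isIn "\n" template = PySem.Chars.isIn "\n".toList template.toList from by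
        simp [PySem.Str.isIn], show ("\n".toList : List Char) = ['\n'] from by decide] at hin'
      rw [← singleton_infix_iff]
      rw [PySem.Chars.isIn_eq_false_iff] at hin'
      exact hin'
    rw [putify_py, putify_py_alt]
    rw [if_neg (by rw [hin']; simp), hin']
    simp only [Bool.not_false, if_true]
    rw [splitOn_nl, split1_single template.toList hnomem]
    rw [PySem.List.foldl_append_singleton_eq_map]
    rw [List.nil_append, List.map_singleton]
    rw [PySem.Chars.join_singleton]
    apply congrArg
    rw [if_pos (show ([template.toList] : List (List Char)).length = 1 from rfl)]
    exact lineA_eq template.toList [] NPt (fun c hc => absurd hc List.not_mem_nil)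

-- ===== VERDICT (by name: the statement is the Claim_ definition above) =====
theorem putify_py_spec : Claim_unchanged_putify_py := by
  intro template _ hD
  exact main_eq template hD
set_option maxHeartbeats 2000000 in
theorem putify_py_changed : Claim_changed_putify_py := by
  unfold Claim_changed_putify_py; decide
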